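-- pv_equiv track=rewrite | github.com/gobelo7/gobelo_grammar_toolkit | gobelo_grammar_toolkit/cli/ggt_cli.py | _resolve_concord_type
-- ===== SOURCE A (Python) =====
-- from typing import List, Optional
--
-- def _resolve_concord_type(
--     partial: str, all_types: List[str]
-- ) -> Optional[str]:
--     """
--     Fuzzy-resolve a user-supplied concord type string.
--
--     Tries exact match, then ``partial + '_concords'`` suffix, then prefix
--     match, then substring match.  Returns ``None`` if nothing matches.
--     """
--     if partial in all_types:
--         return partial
--     # e.g. "subject" → "subject_concords"
--     with_suffix = partial + "_concords"
--     if with_suffix in all_types: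
--         return with_suffix
--     # prefix match
--     prefix_hits = [t for t in all_types if t.startswith(partial)]
--     if len(prefix_hits) == 1:
--         return prefix_hits[0]
--     # substring match
--     sub_hits = [t for t in all_types if partial in t]
--     if len(sub_hits) == 1:
--         return sub_hits[0]
--     return None
-- ===== SOURCE B (Python) =====
-- from typing import List, Optional
--
-- def _resolve_concord_type(partial: str, all_types: List[str]) -> Optional[str]:
--     """Classify every candidate once into a mutually exclusive match rank
--     (0 exact, 1 suffix form, 2 proper prefix hit, 3 proper substring hit,
--     4 no match), then dispatch on the rank multiset: any rank-0 -> partial,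
--     any rank-1 -> partial + '_concords', a lone rank-2 -> that candidate,
--     no rank-2 and a lone rank-3 -> that candidate, else None.  Correct
--     because exact < suffix < prefix < substring is a containment chain, so
--     with no rank-0/1 present A's prefix_hits are exactly the rank-2 items
--     and its sub_hits the rank-2 plus rank-3 items."""
--     suffix = partial + "_concords"
--     def rank(t: str) -> int:
--         if t == partial:
--             return 0
--         if t == suffix:
--             return 1
--         if t.startswith(partial):
--             return 2
--         if partial in t:
--             return 3
--         return 4
--     ranks = [rank(t) for t in all_types]
--     if 0 in ranks:
--         return partial
--     if 1 in ranks: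
--         return suffix
--     if ranks.count(2) == 1:
--         return all_types[ranks.index(2)]
--     if ranks.count(2) == 0 and ranks.count(3) == 1:
--         return all_types[ranks.index(3)]
--     return None
-- ===== Notes on version B (the rewrite author's own statement) =====
-- stated objective: alternative
-- what changed: Replaces A's prioritized staged scans (two membership tests, then a prefix filter, then a substring filter) with a classify-then-dispatch algorithm: every candidate is ranked once into one of five mutually exclusive match categories, and the answer is read off the rank list via contains/count/index.
import Mathlib
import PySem

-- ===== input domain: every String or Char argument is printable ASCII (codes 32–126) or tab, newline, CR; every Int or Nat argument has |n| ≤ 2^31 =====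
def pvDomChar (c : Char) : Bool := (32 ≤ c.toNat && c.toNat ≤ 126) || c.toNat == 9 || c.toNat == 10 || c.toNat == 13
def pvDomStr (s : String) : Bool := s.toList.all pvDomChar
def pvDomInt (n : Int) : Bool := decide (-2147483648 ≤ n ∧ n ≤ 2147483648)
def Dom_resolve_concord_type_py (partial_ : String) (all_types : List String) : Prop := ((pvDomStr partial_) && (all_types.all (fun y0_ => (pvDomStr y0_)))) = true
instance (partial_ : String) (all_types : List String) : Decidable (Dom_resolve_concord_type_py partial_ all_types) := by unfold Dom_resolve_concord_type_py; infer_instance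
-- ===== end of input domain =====

-- B replaces A's staged re-scans by a classify-then-dispatch algorithm: each candidate is
-- ranked once into a mutually exclusive match category, then the answer is read off the
-- rank multiset (objective: alternative).

-- ===== PORT A =====
def resolve_concord_type_py (partial_ : String) (all_types : List String) : Option String :=
  if all_types.contains partial_ then some partial_
  else
    let with_suffix := String.ofList (partial_.toList ++ "_concords".toList)
    if all_types.contains with_suffix then some with_suffix
    else
      let prefix_hits := all_types.filter (fun t => PySem.Str.startswith t partial_)
      if prefix_hits.length = 1 then PySem.List.pyGet? prefix_hits 0
      else
        let sub_hits := all_types.filter (fun t => PySem.Str.isIn partial_ t)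
        if sub_hits.length = 1 then PySem.List.pyGet? sub_hits 0
        else none

-- ===== PORT B =====
-- Source B's rank(t): the mutually exclusive match category of one candidate
def rctRank (p w t : String) : Int :=
  if t == p then 0
  else if t == w then 1
  else if PySem.Str.startswith t p then 2
  else if PySem.Str.isIn p t then 3
  else 4

def resolve_concord_type_py_alt (partial_ : String) (all_types : List String) : Option String :=
  let suffix := String.ofList (partial_.toList ++ "_concords".toList)
  let ranks := all_types.map (rctRank partial_ suffix)
  if ranks.contains 0 then some partial_
  else if ranks.contains 1 then some suffix
  else if ranks.count 2 = 1 then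
    (PySem.List.index? ranks 2).bind (fun i => PySem.List.pyGet? all_types (i : Int))
  else if ranks.count 2 = 0 ∧ ranks.count 3 = 1 then
    (PySem.List.index? ranks 3).bind (fun i => PySem.List.pyGet? all_types (i : Int))
  else none

-- ===== PRECONDITION & SPEC =====
def Spec_resolve_concord_type_py (partial_ : String) (all_types : List String) (out : Option String) : Prop := out = resolve_concord_type_py_alt partial_ all_types
instance (partial_ : String) (all_types : List String) (out : Option String) : Decidable (Spec_resolve_concord_type_py partial_ all_types out) := by unfold Spec_resolve_concord_type_py; infer_instance

-- ===== CLAIM (what is proved, stated in full; the proofs are below) =====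
def Claim_equal_resolve_concord_type_py : Prop := ∀ (partial_ : String) (all_types : List String), Dom_resolve_concord_type_py partial_ all_types → Spec_resolve_concord_type_py partial_ all_types (resolve_concord_type_py partial_ all_types)

-- ===== LEMMAS AND PROOFS =====

-- the suffix string is strictly longer than partial_, hence distinct from it
theorem rct_suffix_ne (p : String) : String.ofList (p.toList ++ "_concords".toList) ≠ p := by
  intro h
  have := congrArg (fun s => s.toList.length) h
  simp at this

theorem rct_pyGet?_zero (l : List String) : PySem.List.pyGet? l 0 = l.head? := by
  cases l <;> simp [PySem.List.pyGet?, PySem.List.pyIdx?]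

-- a rank-0 element is exactly an exact match
theorem rct_contains_zero (p w : String) (xs : List String) :
    (xs.map (rctRank p w)).contains 0 = xs.contains p := by
  induction xs with
  | nil => rfl
  | cons t ts ih =>
    simp only [List.map_cons, List.contains_cons, ih]
    congr 1
    by_cases h : t = p
    · subst h; simp [rctRank]
    · simp only [rctRank, beq_iff_eq, h, if_false]
      have h2 : (p == t) = false := by simp [Ne.symm h]
      rw [h2]
      split_ifs <;> rfl

-- a rank-1 element is exactly the suffix form (w ≠ p)
theorem rct_contains_one (p w : String) (hw : w ≠ p) (xs : List String) :
    (xs.map (rctRank p w)).contains 1 = xs.contains w := by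
  induction xs with
  | nil => rfl
  | cons t ts ih =>
    simp only [List.map_cons, List.contains_cons, ih]
    congr 1
    by_cases h : t = w
    · subst h; simp [rctRank, hw]
    · simp only [rctRank, beq_iff_eq, h, if_false]
      have h2 : (w == t) = false := by simp [Ne.symm h]
      rw [h2]
      split_ifs <;> rfl

-- with no exact or suffix match present, rank 2 ⇔ prefix hit
theorem rct_rank_two_iff (p w t : String) (hp : t ≠ p) (hw : t ≠ w) :
    (rctRank p w t = 2) ↔ PySem.Str.startswith t p = true := by
  unfold rctRank
  rw [if_neg (by simp [hp]), if_neg (by simp [hw])]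
  by_cases h : PySem.Str.startswith t p = true
  · have h' : PySem.Chars.startswith t.toList p.toList = true := h
    rw [if_pos h]
    simp [h']
  · have h' : PySem.Chars.startswith t.toList p.toList = false := by
      cases hb : PySem.Chars.startswith t.toList p.toList
      · rfl
      · exact absurd hb h
    rw [if_neg h]
    split_ifs <;> simp [h']

-- with no exact/suffix/prefix match present, rank 3 ⇔ substring hit
theorem rct_rank_three_iff (p w t : String) (hp : t ≠ p) (hw : t ≠ w)
    (hs : PySem.Str.startswith t p = false) :
    (rctRank p w t = 3) ↔ PySem.Str.isIn p t = true := by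
  unfold rctRank
  rw [if_neg (by simp [hp]), if_neg (by simp [hw]), if_neg (by rw [hs]; exact Bool.false_ne_true)]
  by_cases h : PySem.Str.isIn p t = true
  · have h' : PySem.Chars.isIn p.toList t.toList = true := h
    rw [if_pos h]
    simp [h']
  · have h' : PySem.Chars.isIn p.toList t.toList = false := by
      cases hb : PySem.Chars.isIn p.toList t.toList
      · rfl
      · exact absurd hb h
    rw [if_neg h]
    simp [h']

-- a prefix hit is a substring hit
theorem rct_startswith_isIn (p t : String) (h : PySem.Str.startswith t p = true) :
    PySem.Str.isIn p t = true := by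
  rw [PySem.Str.isIn_iff_infix]
  have h' : PySem.Chars.startswith t.toList p.toList = true := h
  exact ((PySem.Chars.startswith_iff (s := t.toList) (p := p.toList)).mp h').isInfix

-- count of rank-2 elements = length of A's prefix_hits
theorem rct_count_two (p w : String) (xs : List String)
    (h : ∀ t ∈ xs, t ≠ p ∧ t ≠ w) :
    (xs.map (rctRank p w)).count 2 =
      (xs.filter (fun t => PySem.Str.startswith t p)).length := by
  induction xs with
  | nil => rfl
  | cons t ts ih =>
    have ht := h t (by simp)
    have ih' := ih (fun u hu => h u (by simp [hu]))
    simp only [List.map_cons, List.count_cons, List.filter_cons]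
    by_cases h2 : PySem.Str.startswith t p = true
    · rw [if_pos h2]
      have : rctRank p w t = 2 := (rct_rank_two_iff p w t ht.1 ht.2).mpr h2
      simp [this, ih']
    · rw [if_neg h2]
      have : rctRank p w t ≠ 2 := fun hc => h2 ((rct_rank_two_iff p w t ht.1 ht.2).mp hc)
      simp [this, ih']

-- sub_hits splits into the rank-2 and rank-3 elements
theorem rct_count_sub (p w : String) (xs : List String)
    (h : ∀ t ∈ xs, t ≠ p ∧ t ≠ w) :
    (xs.filter (fun t => PySem.Str.isIn p t)).length =
      (xs.map (rctRank p w)).count 2 + (xs.map (rctRank p w)).count 3 := by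
  induction xs with
  | nil => rfl
  | cons t ts ih =>
    have ht := h t (by simp)
    have ih' := ih (fun u hu => h u (by simp [hu]))
    simp only [List.map_cons, List.count_cons, List.filter_cons]
    have ih2 : (List.filter (fun t => PySem.Chars.isIn p.toList t.toList) ts).length =
        (ts.map (rctRank p w)).count 2 + (ts.map (rctRank p w)).count 3 := ih'
    by_cases hs : PySem.Str.startswith t p = true
    · have h2 : rctRank p w t = 2 := (rct_rank_two_iff p w t ht.1 ht.2).mpr hs
      have hn3 : rctRank p w t ≠ 3 := by rw [h2]; decide
      rw [if_pos (rct_startswith_isIn p t hs)]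
      simp [h2]
      omega
    · have hs' : PySem.Str.startswith t p = false := by
        cases hb : PySem.Str.startswith t p
        · rfl
        · exact absurd hb hs
      have hn2 : rctRank p w t ≠ 2 := fun hc => hs ((rct_rank_two_iff p w t ht.1 ht.2).mp hc)
      by_cases hin : PySem.Str.isIn p t = true
      · have h3 : rctRank p w t = 3 := (rct_rank_three_iff p w t ht.1 ht.2 hs').mpr hin
        rw [if_pos hin]
        simp [h3]
        omega
      · have hn3 : rctRank p w t ≠ 3 := fun hc => hin ((rct_rank_three_iff p w t ht.1 ht.2 hs').mp hc)
        rw [if_neg hin]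
        simp [hn2, hn3]
        omega

-- the element B indexes at the first rank-2 position = head of A's prefix_hits
theorem rct_first_two (p w : String) (xs : List String)
    (h : ∀ t ∈ xs, t ≠ p ∧ t ≠ w) :
    (PySem.List.index? (xs.map (rctRank p w)) 2).bind
        (fun i => PySem.List.pyGet? xs (i : Int)) =
      (xs.filter (fun t => PySem.Str.startswith t p)).head? := by
  induction xs with
  | nil => rfl
  | cons t ts ih =>
    have ht := h t (by simp)
    have ih' := ih (fun u hu => h u (by simp [hu]))
    simp only [List.map_cons, List.filter_cons]
    by_cases h2 : PySem.Str.startswith t p = true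
    · have hr : rctRank p w t = 2 := (rct_rank_two_iff p w t ht.1 ht.2).mpr h2
      rw [if_pos h2, hr, PySem.List.index?_cons_self]
      simp [PySem.List.pyGet?_natCast]
    · have hr : rctRank p w t ≠ 2 := fun hc => h2 ((rct_rank_two_iff p w t ht.1 ht.2).mp hc)
      rw [if_neg h2, PySem.List.index?_cons_of_ne _ hr, ← ih']
      cases hidx : PySem.List.index? (ts.map (rctRank p w)) 2 with
      | none => simp
      | some i => simp [PySem.List.pyGet?_natCast]

-- the element B indexes at the first rank-3 position = head of A's sub_hits (no prefix hits)
theorem rct_first_three (p w : String) (xs : List String)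
    (h : ∀ t ∈ xs, t ≠ p ∧ t ≠ w ∧ PySem.Str.startswith t p = false) :
    (PySem.List.index? (xs.map (rctRank p w)) 3).bind
        (fun i => PySem.List.pyGet? xs (i : Int)) =
      (xs.filter (fun t => PySem.Str.isIn p t)).head? := by
  induction xs with
  | nil => rfl
  | cons t ts ih =>
    have ht := h t (by simp)
    have ih' := ih (fun u hu => h u (by simp [hu]))
    simp only [List.map_cons, List.filter_cons]
    by_cases h2 : PySem.Str.isIn p t = true
    · have hr : rctRank p w t = 3 := (rct_rank_three_iff p w t ht.1 ht.2.1 ht.2.2).mpr h2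
      rw [if_pos h2, hr, PySem.List.index?_cons_self]
      simp [PySem.List.pyGet?_natCast]
    · have hr : rctRank p w t ≠ 3 := fun hc => h2 ((rct_rank_three_iff p w t ht.1 ht.2.1 ht.2.2).mp hc)
      rw [if_neg h2, PySem.List.index?_cons_of_ne _ hr, ← ih']
      cases hidx : PySem.List.index? (ts.map (rctRank p w)) 3 with
      | none => simp
      | some i => simp [PySem.List.pyGet?_natCast]

-- ===== VERDICT (by name: the statement is the Claim_ definition above) =====
theorem resolve_concord_type_py_spec : Claim_equal_resolve_concord_type_py := by
  intro p xs _
  unfold Spec_resolve_concord_type_py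
  simp only [resolve_concord_type_py, resolve_concord_type_py_alt]
  set w := String.ofList (p.toList ++ "_concords".toList) with hwdef
  have hwp : w ≠ p := rct_suffix_ne p
  by_cases hc0 : xs.contains p
  · have b0 : ((xs.map (rctRank p w)).contains 0) = true := by
      rw [rct_contains_zero]; exact hc0
    rw [if_pos hc0, if_pos b0]
  · have b0 : ¬ (((xs.map (rctRank p w)).contains 0) = true) := by
      rw [rct_contains_zero]; exact hc0
    rw [if_neg hc0, if_neg b0]
    by_cases hc1 : xs.contains w
    · have b1 : ((xs.map (rctRank p w)).contains 1) = true := by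
        rw [rct_contains_one p w hwp]; exact hc1
      rw [if_pos hc1, if_pos b1]
    · have b1 : ¬ (((xs.map (rctRank p w)).contains 1) = true) := by
        rw [rct_contains_one p w hwp]; exact hc1
      rw [if_neg hc1, if_neg b1]
      have hnp : ∀ t ∈ xs, t ≠ p ∧ t ≠ w := by
        intro t htm
        constructor
        · intro he; subst he; exact hc0 (by simpa using htm)
        · intro he; subst he; exact hc1 (by simpa using htm)
      have hlen2 := rct_count_two p w xs hnp
      by_cases hc2 : ((xs.map (rctRank p w)).count 2 = 1)
      · have a2 : (xs.filter (fun t => PySem.Str.startswith t p)).length = 1 := by omega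
        rw [if_pos a2, if_pos hc2, rct_pyGet?_zero, rct_first_two p w xs hnp]
      · have a2 : ¬ ((xs.filter (fun t => PySem.Str.startswith t p)).length = 1) := by omega
        rw [if_neg a2, if_neg hc2]
        have hsub := rct_count_sub p w xs hnp
        by_cases hc3 : ((xs.map (rctRank p w)).count 2 = 0 ∧ (xs.map (rctRank p w)).count 3 = 1)
        · have a3 : (xs.filter (fun t => PySem.Str.isIn p t)).length = 1 := by omega
          rw [if_pos a3, if_pos hc3, rct_pyGet?_zero]
          have hnostart : ∀ t ∈ xs, t ≠ p ∧ t ≠ w ∧ PySem.Str.startswith t p = false := by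
            have hfil : (xs.filter (fun t => PySem.Str.startswith t p)).length = 0 := by omega
            rw [List.length_eq_zero_iff, List.filter_eq_nil_iff] at hfil
            intro t htm
            refine ⟨(hnp t htm).1, (hnp t htm).2, ?_⟩
            cases hb : PySem.Str.startswith t p
            · rfl
            · exact absurd hb (by simpa using hfil t htm)
          rw [rct_first_three p w xs hnostart]
        · have a3 : ¬ ((xs.filter (fun t => PySem.Str.isIn p t)).length = 1) := by omega
          rw [if_neg a3, if_neg hc3]
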